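-- pv_equiv track=rewrite | github.com/thanhit95/multi-threading | python/exer01c_max_div.py | prepare_arg
-- ===== SOURCE A (Python) =====
-- def prepare_arg(rng_start: int, rng_end: int, num_threads: int) -> list[dict]:
--     rng_block = (rng_end - rng_start + 1) // num_threads
--     rng_a = rng_start
--     lst_arg = []
--
--     for i in range(num_threads):
--         rng_b = rng_a + rng_block - 1 if i < num_threads - 1 else rng_end
--         lst_arg.append({ 'start': rng_a, 'end': rng_b })
--         rng_a += rng_block
--
--     return lst_arg
-- ===== SOURCE B (Python) =====
-- def prepare_arg(rng_start: int, rng_end: int, num_threads: int) -> list[dict]: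
--     rng_block = (rng_end - rng_start + 1) // num_threads
--     cuts = [rng_start + i * rng_block for i in range(num_threads)] + [rng_end + 1]
--     return [{'start': a, 'end': b - 1} for a, b in zip(cuts, cuts[1:])]
-- ===== Notes on version B (the rewrite author's own statement) =====
-- stated objective: alternative
-- what changed: B works in two stages: it first materialises the list of block boundaries (cut points) and then zips consecutive boundaries into (start, end) pairs, so there is no running accumulator and no per-iteration last-thread branch -- the final cut rng_end+1 makes the last block end at rng_end automatically.
import Mathlib
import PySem

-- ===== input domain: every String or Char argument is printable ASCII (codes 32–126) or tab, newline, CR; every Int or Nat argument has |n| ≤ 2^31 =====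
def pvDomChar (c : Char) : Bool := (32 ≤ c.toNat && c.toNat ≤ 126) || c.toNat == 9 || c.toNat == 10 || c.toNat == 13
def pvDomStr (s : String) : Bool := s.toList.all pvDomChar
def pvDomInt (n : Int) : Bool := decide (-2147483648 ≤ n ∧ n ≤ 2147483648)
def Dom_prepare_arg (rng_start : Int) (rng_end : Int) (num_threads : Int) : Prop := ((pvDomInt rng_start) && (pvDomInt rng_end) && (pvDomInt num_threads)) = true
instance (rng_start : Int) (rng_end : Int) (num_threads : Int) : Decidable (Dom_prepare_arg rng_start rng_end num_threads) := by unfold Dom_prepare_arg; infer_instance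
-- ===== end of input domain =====

-- B builds the list of block boundaries (cut points) first and then zips consecutive
-- boundaries into start/end pairs, eliminating A's running accumulator and the per-iteration
-- last-thread branch; objective: alternative. Pre_ excludes num_threads = 0, where A raises
-- ZeroDivisionError.


-- ===== PORT A =====
-- literal transliteration: running accumulator rng_a and appended list, over range(num_threads)
def prepare_arg (rng_start : Int) (rng_end : Int) (num_threads : Int) : List (List (String × Int)) :=
  let rng_block := PySem.Int.floordiv (rng_end - rng_start + 1) num_threads
  let st := (PySem.List.pyRange 0 num_threads 1).foldl
    (fun (st : Int × List (List (String × Int))) (i : Int) =>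
      let rng_b := if i < num_threads - 1 then st.1 + rng_block - 1 else rng_end
      (st.1 + rng_block, st.2 ++ [[("start", st.1), ("end", rng_b)]]))
    (rng_start, [])
  st.2

-- ===== PORT B =====
-- literal transliteration of Source B: boundary list, then zip of consecutive cut points
def prepare_arg_alt (rng_start : Int) (rng_end : Int) (num_threads : Int) : List (List (String × Int)) :=
  let rng_block := PySem.Int.floordiv (rng_end - rng_start + 1) num_threads
  let cuts := (PySem.List.pyRange 0 num_threads 1).map (fun i => rng_start + i * rng_block)
              ++ [rng_end + 1]
  (cuts.zip (PySem.List.slice cuts (some 1) none)).map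
    (fun p => [("start", p.1), ("end", p.2 - 1)])

-- ===== PRECONDITION & SPEC =====
-- Pre_ excludes exactly num_threads = 0, where A raises ZeroDivisionError.
def Pre_prepare_arg (rng_start : Int) (rng_end : Int) (num_threads : Int) : Prop := num_threads ≠ 0
instance (rng_start : Int) (rng_end : Int) (num_threads : Int) : Decidable (Pre_prepare_arg rng_start rng_end num_threads) := by unfold Pre_prepare_arg; infer_instance
def pvWitness_prepare_arg : Int × Int × Int := (1, 10, 3)

def Spec_prepare_arg (rng_start : Int) (rng_end : Int) (num_threads : Int) (out : List (List (String × Int))) : Prop := out = prepare_arg_alt rng_start rng_end num_threads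
instance (rng_start : Int) (rng_end : Int) (num_threads : Int) (out : List (List (String × Int))) : Decidable (Spec_prepare_arg rng_start rng_end num_threads out) := by unfold Spec_prepare_arg; infer_instance

-- ===== CLAIM (what is proved, stated in full; the proofs are below) =====
def Claim_equal_prepare_arg : Prop := ∀ (rng_start : Int) (rng_end : Int) (num_threads : Int), Dom_prepare_arg rng_start rng_end num_threads → Pre_prepare_arg rng_start rng_end num_threads → Spec_prepare_arg rng_start rng_end num_threads (prepare_arg rng_start rng_end num_threads)

-- ===== LEMMAS AND PROOFS =====

-- Invariant of A's fold over range(0, n): the accumulator is rng_start + n*blk and the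
-- collected list is the closed-form map over that range.
theorem prepare_arg_fold_inv (rs re blk nt : Int) :
    ∀ n : Nat, (n : Int) ≤ nt →
    (PySem.List.pyRange 0 (n : Int) 1).foldl
      (fun (st : Int × List (List (String × Int))) (i : Int) =>
        let rng_b := if i < nt - 1 then st.1 + blk - 1 else re
        (st.1 + blk, st.2 ++ [[("start", st.1), ("end", rng_b)]]))
      (rs, [])
    = (rs + (n : Int) * blk,
       (PySem.List.pyRange 0 (n : Int) 1).map (fun i =>
        [("start", rs + i * blk),
         ("end", if i == nt - 1 then re else rs + (i + 1) * blk - 1)])) := by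
  intro n hn
  induction n with
  | zero =>
    rw [PySem.List.pyRange_one_eq_nil (by omega)]
    simp
  | succ m ih =>
    have hm : (m : Int) ≤ nt := by push_cast at hn ⊢; omega
    have hcast : ((m + 1 : Nat) : Int) = (m : Int) + 1 := by push_cast; ring
    rw [hcast, PySem.List.pyRange_one_succ_right (by positivity),
        List.foldl_append, List.map_append, ih hm]
    simp only [List.foldl_cons, List.foldl_nil, List.map_cons, List.map_nil]
    by_cases h : (m : Int) = nt - 1
    · simp [h]
      ring
    · have hlt : (m : Int) < nt - 1 := by push_cast at hn; omega
      simp [hlt, h]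
      ring

-- Zipping consecutive elements of (map g (range a n) ++ [e]) yields, per index i, the pair
-- (g i, next cut), where the next cut is e at the last index and g (i+1) before it.
theorem consec_zip (g : Int → Int) (e : Int) (nt : Int) :
    ∀ k : Nat, ∀ a : Int, (nt - a).toNat = k →
    (((PySem.List.pyRange a nt 1).map g ++ [e]).zip
       (((PySem.List.pyRange a nt 1).map g ++ [e]).tail)).map
      (fun p => [("start", p.1), ("end", p.2 - 1)])
    = (PySem.List.pyRange a nt 1).map (fun i =>
        [("start", g i), ("end", if i == nt - 1 then e - 1 else g (i + 1) - 1)]) := by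
  intro k
  induction k with
  | zero =>
    intro a ha
    rw [PySem.List.pyRange_one_eq_nil (by omega)]
    simp
  | succ m ih =>
    intro a ha
    have halt : a < nt := by omega
    rw [PySem.List.pyRange_one_cons halt]
    by_cases hlast : a = nt - 1
    · rw [show PySem.List.pyRange (a + 1) nt 1 = [] from
        PySem.List.pyRange_one_eq_nil (by omega)]
      simp [hlast]
    · have h1 : a + 1 < nt := by omega
      rw [PySem.List.pyRange_one_cons h1]
      have := ih (a + 1) (by omega)
      rw [PySem.List.pyRange_one_cons h1] at this
      simp only [List.map_cons, List.cons_append, List.tail_cons, List.zip_cons_cons] at this ⊢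
      rw [this]
      simp [hlast]

theorem prepare_arg_eq (rs re nt : Int) (_h : nt ≠ 0) :
    prepare_arg rs re nt = prepare_arg_alt rs re nt := by
  simp only [prepare_arg, prepare_arg_alt, PySem.List.slice_from_one]
  by_cases hle : nt ≤ 0
  · rw [PySem.List.pyRange_one_eq_nil (by omega)]
    simp
  · have hnt : ((nt.toNat : Nat) : Int) = nt := Int.toNat_of_nonneg (by omega)
    rw [consec_zip (fun i => rs + i * (PySem.Int.floordiv (re - rs + 1) nt)) (re + 1) nt
          (nt - 0).toNat 0 rfl]
    rw [← hnt, prepare_arg_fold_inv rs re _ _ nt.toNat (le_refl _)]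
    simp only [hnt]
    apply List.map_congr_left
    intro i _
    by_cases h : i = nt - 1 <;> simp [h]

-- ===== VERDICT (by name: the statement is the Claim_ definition above) =====
theorem prepare_arg_spec : Claim_equal_prepare_arg := by
  intro rs re nt _ hpre
  unfold Spec_prepare_arg
  exact prepare_arg_eq rs re nt hpre
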